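-- pv_equiv track=rewrite | github.com/admecnwmmct-commits/mech-inspection-app | app.py | collect_copy_to
-- ===== SOURCE A (Python) =====
-- def collect_copy_to(header, responses):
--     """Auto-collect unique Action By names from all NO items."""
--     seen = set()
--     names = []
--     for v in responses.values():
--         if v.get('answer') == 'no' and v.get('action_by','').strip():
--             for n in v['action_by'].split(','):
--                 n = n.strip()
--                 if n and n not in seen:
--                     seen.add(n)
--                     names.append(n)
--     return names
-- ===== SOURCE B (Python) =====
-- def collect_copy_to(header, responses):
--     """Auto-collect unique Action By names from all NO items."""
--     flat = [n.strip()
--             for v in responses.values()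
--             if v.get('answer') == 'no' and v.get('action_by', '').strip()
--             for n in v['action_by'].split(',')
--             if n.strip()]
--
--     def dedup(xs):
--         if not xs:
--             return []
--         head, rest = xs[0], xs[1:]
--         return [head] + dedup([x for x in rest if x != head])
--
--     return dedup(flat)
-- ===== Notes on version B (the rewrite author's own statement) =====
-- stated objective: alternative
-- what changed: Two staged passes instead of A's single interleaved loop: first a flat comprehension collects all stripped names from 'no' items, then a recursive partition dedup (keep the head, filter it out of the tail, recurse) replaces A's seen-set membership bookkeeping entirely.
import Mathlib
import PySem

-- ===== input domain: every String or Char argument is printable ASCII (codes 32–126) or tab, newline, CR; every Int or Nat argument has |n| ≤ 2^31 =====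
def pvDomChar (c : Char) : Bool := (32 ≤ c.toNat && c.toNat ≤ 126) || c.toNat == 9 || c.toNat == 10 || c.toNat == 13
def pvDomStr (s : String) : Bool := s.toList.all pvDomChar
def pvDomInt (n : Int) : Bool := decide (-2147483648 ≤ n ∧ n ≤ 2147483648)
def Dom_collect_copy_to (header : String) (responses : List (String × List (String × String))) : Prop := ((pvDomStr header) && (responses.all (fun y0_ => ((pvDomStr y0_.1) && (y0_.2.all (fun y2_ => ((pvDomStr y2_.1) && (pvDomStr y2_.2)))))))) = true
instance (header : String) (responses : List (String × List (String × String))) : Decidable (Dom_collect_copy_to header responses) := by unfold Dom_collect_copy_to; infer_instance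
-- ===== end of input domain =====

-- B collects all stripped names from 'no' items in one flat pass and then removes duplicates
-- with a set-free recursive partition dedup (keep head, filter it from the tail, recurse),
-- replacing A's interleaved seen-set/append loop (objective: alternative).

-- ===== PORT A =====
-- literal transliteration of A: one loop over responses with a (seen, names) pair of accumulators
def collect_copy_to (header : String) (responses : List (String × List (String × String))) : List String :=
  let st : PySem.Set String × List String :=
    responses.foldl
      (fun st kv =>
        let v : PySem.Dict String String := PySem.Dict.mk kv.2
        if (PySem.Dict.getD v "answer" "" == "no")
            && (PySem.Str.strip (PySem.Dict.getD v "action_by" "") != "") then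
          ((PySem.Str.split? (PySem.Dict.getD v "action_by" "") ",").getD []).foldl
            (fun st n =>
              let n := PySem.Str.strip n
              if (n != "") && !(PySem.Set.contains st.1 n) then
                (PySem.Set.add st.1 n, st.2 ++ [n])
              else st)
            st
        else st)
      (PySem.Set.empty, [])
  st.2

-- ===== PORT B =====
-- B's recursive dedup: keep the head, filter every later copy of it out of the tail, recurse
def pvDedupRec : List String → List String
  | [] => []
  | a :: t => a :: pvDedupRec (t.filter (fun x => x ≠ a))
termination_by xs => xs.length
decreasing_by
  simp only [List.length_cons, List.length_unattach]
  exact Nat.lt_succ_of_le (le_trans (List.length_filter_le _ _) (by simp))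

-- literal transliteration of B: flat comprehension (flatMap + filterMap), then pvDedupRec
def collect_copy_to_alt (header : String) (responses : List (String × List (String × String))) : List String :=
  let flat : List String :=
    responses.flatMap (fun kv =>
      let v : PySem.Dict String String := PySem.Dict.mk kv.2
      if (PySem.Dict.getD v "answer" "" == "no")
          && (PySem.Str.strip (PySem.Dict.getD v "action_by" "") != "") then
        ((PySem.Str.split? (PySem.Dict.getD v "action_by" "") ",").getD []).filterMap
          (fun p => if PySem.Str.strip p != "" then some (PySem.Str.strip p) else none)
      else [])
  pvDedupRec flat

-- ===== PRECONDITION & SPEC =====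
def Spec_collect_copy_to (header : String) (responses : List (String × List (String × String))) (out : List String) : Prop := out = collect_copy_to_alt header responses
instance (header : String) (responses : List (String × List (String × String))) (out : List String) : Decidable (Spec_collect_copy_to header responses out) := by unfold Spec_collect_copy_to; infer_instance

-- ===== CLAIM (what is proved, stated in full; the proofs are below) =====
def Claim_equal_collect_copy_to : Prop := ∀ (header : String) (responses : List (String × List (String × String))), Dom_collect_copy_to header responses → Spec_collect_copy_to header responses (collect_copy_to header responses)

-- ===== LEMMAS AND PROOFS =====

-- A's inner loop, run from a duplicated state (s, s), keeps the two accumulators equal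
-- (the seen set's element list IS the names list) and acts as a filtered Set.add fold.
theorem inner_pair (ps : List String) (s : PySem.Set String) :
    ps.foldl
      (fun (st : PySem.Set String × List String) n =>
        let n := PySem.Str.strip n
        if (n != "") && !(PySem.Set.contains st.1 n) then
          (PySem.Set.add st.1 n, st.2 ++ [n])
        else st)
      (s, s)
    = (ps.foldl (fun s n => if PySem.Str.strip n != "" then PySem.Set.add s (PySem.Str.strip n) else s) s,
       ps.foldl (fun s n => if PySem.Str.strip n != "" then PySem.Set.add s (PySem.Str.strip n) else s) s) := by
  induction ps generalizing s with
  | nil => rfl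
  | cons p t ih =>
    simp only [List.foldl_cons]
    by_cases h1 : PySem.Str.strip p = ""
    · simpa [h1] using ih s
    · by_cases h2 : PySem.Str.strip p ∈ s
      · simpa [h1, h2] using ih s
      · simpa [h1, h2] using ih (s ++ [PySem.Str.strip p])

-- the filtered Set.add fold over the pieces is Set.add folded over B's filterMap of the pieces
theorem inner_filterMap (ps : List String) (s : PySem.Set String) :
    ps.foldl (fun s n => if PySem.Str.strip n != "" then PySem.Set.add s (PySem.Str.strip n) else s) s
    = (ps.filterMap (fun p => if PySem.Str.strip p != "" then some (PySem.Str.strip p) else none)).foldl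
        PySem.Set.add s := by
  induction ps generalizing s with
  | nil => rfl
  | cons p t ih =>
    by_cases h : PySem.Str.strip p = ""
    · simpa [h] using ih s
    · simpa [h] using ih (PySem.Set.add s (PySem.Str.strip p))

-- the whole of A's loop, projected to either component, is Set.add folded over B's flat list
theorem outer_fold (rs : List (String × List (String × String))) (s : PySem.Set String) :
    rs.foldl
      (fun st kv =>
        let v : PySem.Dict String String := PySem.Dict.mk kv.2
        if (PySem.Dict.getD v "answer" "" == "no")
            && (PySem.Str.strip (PySem.Dict.getD v "action_by" "") != "") then
          ((PySem.Str.split? (PySem.Dict.getD v "action_by" "") ",").getD []).foldl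
            (fun (st : PySem.Set String × List String) n =>
              let n := PySem.Str.strip n
              if (n != "") && !(PySem.Set.contains st.1 n) then
                (PySem.Set.add st.1 n, st.2 ++ [n])
              else st)
            st
        else st)
      (s, s)
    = ((rs.flatMap (fun kv =>
          let v : PySem.Dict String String := PySem.Dict.mk kv.2
          if (PySem.Dict.getD v "answer" "" == "no")
              && (PySem.Str.strip (PySem.Dict.getD v "action_by" "") != "") then
            ((PySem.Str.split? (PySem.Dict.getD v "action_by" "") ",").getD []).filterMap
              (fun p => if PySem.Str.strip p != "" then some (PySem.Str.strip p) else none)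
          else [])).foldl PySem.Set.add s,
       (rs.flatMap (fun kv =>
          let v : PySem.Dict String String := PySem.Dict.mk kv.2
          if (PySem.Dict.getD v "answer" "" == "no")
              && (PySem.Str.strip (PySem.Dict.getD v "action_by" "") != "") then
            ((PySem.Str.split? (PySem.Dict.getD v "action_by" "") ",").getD []).filterMap
              (fun p => if PySem.Str.strip p != "" then some (PySem.Str.strip p) else none)
          else [])).foldl PySem.Set.add s) := by
  induction rs generalizing s with
  | nil => rfl
  | cons kv t ih =>
    simp only [List.foldl_cons, List.flatMap_cons, List.foldl_append]
    cases h : ((PySem.Dict.getD (PySem.Dict.mk kv.2) "answer" "" == "no")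
        && (PySem.Str.strip (PySem.Dict.getD (PySem.Dict.mk kv.2) "action_by" "") != "")) with
    | false =>
      simp only [Bool.false_eq_true, if_false, List.foldl_nil]
      exact ih s
    | true =>
      simp only [if_true]
      rw [inner_pair]
      simp only [inner_filterMap]
      exact ih _

-- the Set.add fold appends, to any starting set s, exactly the recursive partition dedup
-- of the elements of the list that are not already in s
theorem foldl_add_eq_dedupRec (t : List String) (s : PySem.Set String) :
    t.foldl PySem.Set.add s = s ++ pvDedupRec (t.filter (fun x => x ∉ s)) := by
  induction t generalizing s with
  | nil => simp [pvDedupRec]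
  | cons x t ih =>
    simp only [List.foldl_cons, List.filter_cons]
    by_cases hx : x ∈ s
    · simp [hx, ih s]
    · have hadd : PySem.Set.add s x = s ++ [x] := by simp [PySem.Set.add, hx]
      rw [hadd, ih (s ++ [x])]
      have hf : t.filter (fun y => decide (y ∉ s ++ [x]))
          = (t.filter (fun y => decide (y ∉ s))).filter (fun y => decide (y ≠ x)) := by
        rw [List.filter_filter]
        apply List.filter_congr
        intro y _
        by_cases h1 : y = x <;> by_cases h2 : y ∈ s <;> simp [h1, h2]
      rw [hf]
      simp [pvDedupRec, hx, List.append_assoc]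

-- ===== VERDICT (by name: the statement is the Claim_ definition above) =====
theorem collect_copy_to_spec : Claim_equal_collect_copy_to := by
  intro header responses _
  unfold Spec_collect_copy_to collect_copy_to collect_copy_to_alt
  dsimp only []
  rw [show (PySem.Set.empty : PySem.Set String) = ([] : List String) from rfl,
    outer_fold, foldl_add_eq_dedupRec]
  simp
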